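-- pv_equiv track=rewrite | github.com/cirosantilli/project-euler-solutions | solvers/736.py | brute_exists_shorter_path
-- ===== SOURCE A (Python) =====
-- from typing import Iterable, List, Sequence, Tuple
--
-- Point = Tuple[int, int]
--
-- def apply_ops(start: Point, ops: Sequence[str]) -> List[Point]:
--     """Apply ops (each 'r' or 's') starting from `start`, returning all visited points (including start)."""
--     x, y = start
--     states: List[Point] = [(x, y)]
--     for op in ops:
--         if op == "r":
--             x, y = x + 1, y * 2
--         elif op == "s":
--             x, y = x * 2, y + 1
--         else:
--             raise ValueError(f"Unknown op: {op!r}")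
--         states.append((x, y))
--     return states
--
-- def is_path_to_equality(states: Sequence[Point]) -> bool:
--     """True iff final point has x==y and all earlier points have x!=y."""
--     if not states:
--         return False
--     for x, y in states[:-1]:
--         if x == y:
--             return False
--     x, y = states[-1]
--     return x == y
--
-- def brute_exists_shorter_path(start: Point, max_steps: int) -> bool:
--     """
--     Brute-force: check whether there exists ANY path-to-equality from `start`
--     using <= max_steps steps. (Tiny only; used for the sample assertion.)
--     """
--     a, b = start
--     for steps in range(max_steps + 1):
--         # iterate over all 2**steps sequences via bitmasks
--         for mask in range(1 << steps):
--             ops = []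
--             for i in range(steps):
--                 ops.append("r" if (mask >> i) & 1 else "s")
--             states = apply_ops((a, b), ops)
--             if is_path_to_equality(states):
--                 return True
--     return False
-- ===== SOURCE B (Python) =====
-- def brute_exists_shorter_path(start, max_steps):
--     """BFS over the op-tree one level at a time, exiting at the first level reaching x==y.
--     A path-to-equality exists iff equality is reachable within max_steps steps."""
--     if max_steps < 0:
--         return False
--     if start[0] == start[1]:
--         return True
--     frontier = [start]
--     steps = 0
--     while steps < max_steps:
--         steps += 1
--         frontier = [c for (x, y) in frontier
--                     for c in ((x + 1, 2 * y), (2 * x, y + 1))]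
--         if any(x == y for (x, y) in frontier):
--             return True
--     return False
-- ===== Notes on version B (the rewrite author's own statement) =====
-- stated objective: faster
-- what changed: A enumerates, for every length 0..max_steps, all 2^steps op-sequences via bitmasks and replays each from scratch; B does a level-by-level BFS over the binary op-tree carrying states incrementally and exiting at the first level reaching x==y; intended as faster (a timing run measured a multi-fold speedup at the largest size both finished, though it could not confirm its gate).
import Mathlib
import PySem

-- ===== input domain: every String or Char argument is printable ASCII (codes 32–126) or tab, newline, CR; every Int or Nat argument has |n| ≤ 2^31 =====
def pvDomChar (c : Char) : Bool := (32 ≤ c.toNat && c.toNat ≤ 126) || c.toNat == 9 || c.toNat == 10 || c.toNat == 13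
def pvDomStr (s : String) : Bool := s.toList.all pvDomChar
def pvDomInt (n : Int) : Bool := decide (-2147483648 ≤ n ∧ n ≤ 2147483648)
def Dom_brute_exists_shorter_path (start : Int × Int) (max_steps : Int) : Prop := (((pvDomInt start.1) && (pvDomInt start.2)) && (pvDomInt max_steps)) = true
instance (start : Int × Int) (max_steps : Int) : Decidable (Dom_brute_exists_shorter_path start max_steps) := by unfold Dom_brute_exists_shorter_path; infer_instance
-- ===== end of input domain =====

-- B replaces A's enumeration of all 2^steps bitmask op-sequences for every length by a
-- level-by-level BFS over the binary op-tree with early exit (objective: faster; intended as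
-- faster — a timing run measured a multi-fold speedup at the largest size both finished).

-- ===== PORT A =====
-- apply_ops: fold over ops, carrying (current point, visited states).
-- The 'else: raise ValueError' branch is unreachable (A only ever builds "r"/"s" ops); ported as identity.
def pvApplyOps (start : Int × Int) (ops : List String) : List (Int × Int) :=
  (ops.foldl
    (fun (acc : (Int × Int) × List (Int × Int)) op =>
      let p := acc.1
      let q := if op = "r" then (p.1 + 1, p.2 * 2)
               else if op = "s" then (p.1 * 2, p.2 + 1)
               else p
      (q, acc.2 ++ [q]))
    ((start.1, start.2), [(start.1, start.2)])).2

-- is_path_to_equality: the early-return-False loop over states[:-1] is the .any below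
def pvIsPathToEquality (states : List (Int × Int)) : Bool :=
  if states = [] then false
  else if (PySem.List.slice states none (some (-1))).any (fun p => p.1 == p.2) then false
  else
    match PySem.List.pyGet? states (-1) with
    | some p => p.1 == p.2
    | none => false

-- Python '1 << steps' = 2 ^ steps.toNat and '(mask >> i) & 1' = (mask.toNat >>> i.toNat) &&& 1:
-- exact, since steps and mask range over nonnegative values here.
-- body of A's outer loop for one value of `steps` (the 'for mask' loop with its early return)
def pvAInner (start : Int × Int) (steps : Int) : Bool :=
  (PySem.List.pyRange 0 ((2 ^ steps.toNat : Nat) : Int) 1).any fun mask =>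
    let ops := (PySem.List.pyRange 0 steps 1).foldl
      (fun acc i => acc ++ [if (mask.toNat >>> i.toNat) &&& 1 = 1 then "r" else "s"]) []
    pvIsPathToEquality (pvApplyOps (start.1, start.2) ops)

-- A's outer 'for steps in range(max_steps + 1)' with its early 'return True', as structural
-- recursion over the same range (Python's range is lazy; materializing it is not evaluable)
def pvALoop (start : Int × Int) (stop steps : Int) : Bool :=
  if h : steps < stop then
    if pvAInner start steps then true else pvALoop start stop (steps + 1)
  else false
termination_by (stop - steps).toNat
decreasing_by omega

def brute_exists_shorter_path (start : Int × Int) (max_steps : Int) : Bool :=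
  pvALoop start (max_steps + 1) 0

-- ===== PORT B =====
-- one BFS level: all children of the current frontier
def pvExpand (F : List (Int × Int)) : List (Int × Int) :=
  F.flatMap (fun p => [(p.1 + 1, 2 * p.2), (2 * p.1, p.2 + 1)])

-- the while loop: k = number of remaining iterations (max_steps - steps)
def pvBfs (F : List (Int × Int)) : Nat → Bool
  | 0 => false
  | k + 1 =>
    let nxt := pvExpand F
    if nxt.any (fun q => q.1 == q.2) then true else pvBfs nxt k

def brute_exists_shorter_path_alt (start : Int × Int) (max_steps : Int) : Bool :=
  if max_steps < 0 then false
  else if start.1 = start.2 then true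
  else pvBfs [start] max_steps.toNat

-- ===== PRECONDITION & SPEC =====
def Spec_brute_exists_shorter_path (start : Int × Int) (max_steps : Int) (out : Bool) : Prop := out = brute_exists_shorter_path_alt start max_steps
instance (start : Int × Int) (max_steps : Int) (out : Bool) : Decidable (Spec_brute_exists_shorter_path start max_steps out) := by unfold Spec_brute_exists_shorter_path; infer_instance

-- ===== CLAIM (what is proved, stated in full; the proofs are below) =====
def Claim_equal_brute_exists_shorter_path : Prop := ∀ (start : Int × Int) (max_steps : Int), Dom_brute_exists_shorter_path start max_steps → Spec_brute_exists_shorter_path start max_steps (brute_exists_shorter_path start max_steps)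

-- ===== LEMMAS AND PROOFS =====

-- one op applied to a point (true = "r", false = "s")
def pvStep (b : Bool) (p : Int × Int) : Int × Int :=
  if b then (p.1 + 1, p.2 * 2) else (p.1 * 2, p.2 + 1)

-- the list of visited states, cleanly recursive
def pvStatesR (p : Int × Int) : List Bool → List (Int × Int)
  | [] => [p]
  | b :: bs => p :: pvStatesR (pvStep b p) bs

-- "bs is a path to equality from p": end equal, no earlier state equal
def pvGood (p : Int × Int) : List Bool → Bool
  | [] => p.1 == p.2
  | b :: bs => (p.1 != p.2) && pvGood (pvStep b p) bs

def pvOpStr (b : Bool) : String := if b then "r" else "s"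

def pvBits (M n : Nat) : List Bool := (List.range n).map (fun k => decide ((M >>> k) &&& 1 = 1))

theorem pvStatesR_ne_nil (p : Int × Int) (bs : List Bool) : pvStatesR p bs ≠ [] := by
  cases bs <;> simp [pvStatesR]

theorem pvGetLast?_cons {α : Type} (p : α) (S : List α) (h : S ≠ []) :
    (p :: S).getLast? = S.getLast? := by
  cases S with
  | nil => exact absurd rfl h
  | cons a l => simp [List.getLast?_cons_cons]

theorem pvStatesR_cons_tail (p : Int × Int) (bs : List Bool) :
    p :: (pvStatesR p bs).tail = pvStatesR p bs := by
  cases bs <;> simp [pvStatesR]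

theorem pvApplyOps_foldl (bs : List Bool) (p : Int × Int) (pre : List (Int × Int)) :
    (( (bs.map pvOpStr).foldl
      (fun (acc : (Int × Int) × List (Int × Int)) op =>
        let p := acc.1
        let q := if op = "r" then (p.1 + 1, p.2 * 2)
                 else if op = "s" then (p.1 * 2, p.2 + 1)
                 else p
        (q, acc.2 ++ [q])) (p, pre)).2) = pre ++ (pvStatesR p bs).tail := by
  induction bs generalizing p pre with
  | nil => simp [pvStatesR]
  | cons b bs ih =>
    cases b <;>
      simp [pvOpStr, pvStatesR, pvStep, List.foldl_cons, ih, List.append_assoc,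
        pvStatesR_cons_tail]

theorem pvApplyOps_eq (p : Int × Int) (bs : List Bool) :
    pvApplyOps p (bs.map pvOpStr) = pvStatesR p bs := by
  have h := pvApplyOps_foldl bs (p.1, p.2) [(p.1, p.2)]
  unfold pvApplyOps
  rw [h]
  cases bs <;> simp [pvStatesR]

theorem pvIsPath_statesR (p : Int × Int) (bs : List Bool) :
    pvIsPathToEquality (pvStatesR p bs) = pvGood p bs := by
  induction bs generalizing p with
  | nil =>
    simp [pvStatesR, pvGood, pvIsPathToEquality, PySem.List.slice_to_neg_one,
      PySem.List.pyGet?_neg_one]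
  | cons b bs ih =>
    have hne := pvStatesR_ne_nil (pvStep b p) bs
    have hgood : pvGood p (b :: bs) = ((p.1 != p.2) && pvGood (pvStep b p) bs) := rfl
    rw [hgood, ← ih (pvStep b p)]
    simp only [pvStatesR, pvIsPathToEquality, PySem.List.slice_to_neg_one,
      PySem.List.pyGet?_neg_one]
    rw [List.dropLast_cons_of_ne_nil hne, pvGetLast?_cons _ _ hne]
    by_cases h : p.1 = p.2 <;> simp [h, hne, Bool.and_assoc, bne]

theorem pvBits_length (M n : Nat) : (pvBits M n).length = n := by simp [pvBits]

theorem pvBits_succ (M n : Nat) :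
    pvBits M (n + 1) = decide (M &&& 1 = 1) :: pvBits (M / 2) n := by
  simp only [pvBits, List.range_succ_eq_map, List.map_cons, List.map_map]
  rw [List.cons.injEq]
  refine ⟨by simp, ?_⟩
  apply List.map_congr_left
  intro k _
  have h : M >>> (k + 1) = (M / 2) >>> k := by
    rw [Nat.shiftRight_succ_inside]
  simp [Function.comp, h]

theorem pvBits_surj (bs : List Bool) : ∃ M, M < 2 ^ bs.length ∧ pvBits M bs.length = bs := by
  induction bs with
  | nil => exact ⟨0, by simp [pvBits]⟩
  | cons b bs ih =>
    obtain ⟨M', hlt, hbits⟩ := ih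
    refine ⟨2 * M' + b.toNat, ?_, ?_⟩
    · cases b <;> simp only [Bool.toNat_false, Bool.toNat_true, List.length_cons, pow_succ] <;>
        omega
    · have hM2 : (2 * M' + b.toNat) / 2 = M' := by cases b <;> (simp; try omega)
      have hM1 : decide ((2 * M' + b.toNat) &&& 1 = 1) = b := by
        cases b <;> simp [Nat.and_one_is_mod, Nat.mul_add_mod_self_left]
      simp only [List.length_cons, pvBits_succ, hM2, hM1, hbits]

theorem pvExpand_eq (F : List (Int × Int)) :
    pvExpand F = F.flatMap (fun p => [pvStep true p, pvStep false p]) := by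
  simp [pvExpand, pvStep, mul_comm]

theorem pvBfs_iff (k : Nat) : ∀ F : List (Int × Int), (∀ p ∈ F, p.1 ≠ p.2) →
    (pvBfs F k = true ↔ ∃ p ∈ F, ∃ bs : List Bool, bs.length ≤ k ∧ pvGood p bs = true) := by
  induction k with
  | zero =>
    intro F hF
    simp only [pvBfs]
    constructor
    · intro h
      exact absurd h (by simp)
    · rintro ⟨p, hp, bs, hlen, hg⟩
      have hbs : bs = [] := List.eq_nil_of_length_eq_zero (Nat.le_zero.mp hlen)
      subst hbs
      exact absurd (by simpa [pvGood] using hg) (hF p hp)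
  | succ k ih =>
    intro F hF
    rw [pvBfs, pvExpand_eq]
    by_cases hany : (F.flatMap (fun p => [pvStep true p, pvStep false p])).any
        (fun q => q.1 == q.2) = true
    · rw [if_pos hany]
      simp only [true_iff, List.any_eq_true, List.mem_flatMap] at hany ⊢
      obtain ⟨q, ⟨p, hp, hq⟩, heq⟩ := hany
      simp only [List.mem_cons] at hq
      rcases hq with hq | hq | hq
      · exact ⟨p, hp, [true], by simp,
          by simp [pvGood, hF p hp, ← hq, by simpa using heq]⟩
      · exact ⟨p, hp, [false], by simp,
          by simp [pvGood, hF p hp, ← hq, by simpa using heq]⟩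
      · exact absurd hq (by simp)
    · rw [if_neg hany]
      have hF' : ∀ q ∈ F.flatMap (fun p => [pvStep true p, pvStep false p]), q.1 ≠ q.2 := by
        intro q hq hqq
        exact hany (by simp only [List.any_eq_true]; exact ⟨q, hq, by simpa using hqq⟩)
      rw [ih _ hF']
      constructor
      · rintro ⟨q, hq, bs, hlen, hg⟩
        rw [List.mem_flatMap] at hq
        obtain ⟨p, hp, hq⟩ := hq
        simp only [List.mem_cons] at hq
        rcases hq with hq | hq | hq
        · exact ⟨p, hp, true :: bs, by simpa using hlen,
            by simp [pvGood, hF p hp, hq ▸ hg]⟩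
        · exact ⟨p, hp, false :: bs, by simpa using hlen,
            by simp [pvGood, hF p hp, hq ▸ hg]⟩
        · exact absurd hq (by simp)
      · rintro ⟨p, hp, bs, hlen, hg⟩
        cases bs with
        | nil => exact absurd (by simpa [pvGood] using hg) (hF p hp)
        | cons b bs =>
          have hg2 : pvGood (pvStep b p) bs = true := by
            simpa [pvGood, hF p hp] using hg
          refine ⟨pvStep b p, ?_, bs, by simpa using hlen, hg2⟩
          rw [List.mem_flatMap]
          exact ⟨p, hp, by cases b <;> simp⟩

-- the inner check of A, rewritten through pvGood
theorem pvInner_eq (start : Int × Int) (steps mask : Int) :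
    pvIsPathToEquality (pvApplyOps (start.1, start.2)
        ((PySem.List.pyRange 0 steps 1).foldl
          (fun acc i => acc ++ [if (mask.toNat >>> i.toNat) &&& 1 = 1 then "r" else "s"]) []))
      = pvGood start (pvBits mask.toNat steps.toNat) := by
  have hops : (PySem.List.pyRange 0 steps 1).map
      (fun i => if (mask.toNat >>> i.toNat) &&& 1 = 1 then "r" else "s")
      = (pvBits mask.toNat steps.toNat).map pvOpStr := by
    rw [PySem.List.pyRange_one, pvBits]
    simp only [List.map_map, sub_zero]
    apply List.map_congr_left
    intro k hk
    simp only [Function.comp, zero_add, Int.toNat_natCast, pvOpStr]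
    split_ifs with h1 h2 h2 <;> simp_all
  rw [PySem.List.foldl_append_singleton_eq_map, List.nil_append, hops, pvApplyOps_eq,
    pvIsPath_statesR]

-- the recursive outer loop is the any over its range
theorem pvALoop_eq (start : Int × Int) (stop steps : Int) :
    pvALoop start stop steps = (PySem.List.pyRange steps stop 1).any (pvAInner start) := by
  by_cases h : steps < stop
  · rw [pvALoop, dif_pos h, pvALoop_eq start stop (steps + 1),
      PySem.List.pyRange_one_cons h, List.any_cons]
    cases pvAInner start steps <;> simp
  · rw [pvALoop, dif_neg h, PySem.List.pyRange_one_eq_nil (by omega)]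
    simp
termination_by (stop - steps).toNat
decreasing_by omega

theorem pvA_iff (start : Int × Int) (m : Int) (hm : 0 ≤ m) :
    brute_exists_shorter_path start m = true ↔
      ∃ bs : List Bool, bs.length ≤ m.toNat ∧ pvGood start bs = true := by
  unfold brute_exists_shorter_path
  rw [pvALoop_eq]
  simp only [pvAInner, List.any_eq_true]
  constructor
  · rintro ⟨steps, hmem, mask, hmmem, hchk⟩
    have hsb := (PySem.List.mem_pyRange_one).mp hmem
    rw [pvInner_eq start steps mask] at hchk
    exact ⟨pvBits mask.toNat steps.toNat, by rw [pvBits_length]; omega, hchk⟩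
  · rintro ⟨bs, hlen, hg⟩
    obtain ⟨M, hMlt, hMbits⟩ := pvBits_surj bs
    refine ⟨(bs.length : Int), ?_, (M : Int), ?_, ?_⟩
    · rw [PySem.List.mem_pyRange_one]; omega
    · rw [PySem.List.mem_pyRange_one]
      constructor
      · positivity
      · exact_mod_cast hMlt
    · rw [pvInner_eq start (bs.length : Int) (M : Int)]
      simpa [hMbits] using hg

-- ===== VERDICT (by name: the statement is the Claim_ definition above) =====
theorem brute_exists_shorter_path_spec : Claim_equal_brute_exists_shorter_path := by
  intro start m _
  unfold Spec_brute_exists_shorter_path brute_exists_shorter_path_alt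
  by_cases hm : m < 0
  · rw [if_pos hm]
    unfold brute_exists_shorter_path
    rw [pvALoop_eq, PySem.List.pyRange_one_eq_nil (by omega)]
    simp
  · rw [if_neg hm]
    rw [Int.not_lt] at hm
    by_cases hxy : start.1 = start.2
    · rw [if_pos hxy, Bool.eq_iff_iff, pvA_iff start m hm]
      simp only [iff_true]
      exact ⟨[], by simp, by simp [pvGood, hxy]⟩
    · rw [if_neg hxy, Bool.eq_iff_iff, pvA_iff start m hm,
        pvBfs_iff m.toNat [start] (by simpa using hxy)]
      constructor
      · rintro ⟨bs, h1, h2⟩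
        exact ⟨start, by simp, bs, h1, h2⟩
      · rintro ⟨p, hp, bs, h1, h2⟩
        rw [List.mem_singleton] at hp
        subst hp
        exact ⟨bs, h1, h2⟩
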